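-- pv_equiv track=rewrite | github.com/RuadhanMulcahy/adventofcode | day_3.py | item_in_both
-- ===== SOURCE A (Python) =====
-- def item_in_both(compartment_1, compartment_2):
--     compartment_1_lookup = {}
--
--     for item in compartment_1:
--         compartment_1_lookup[item] = None
--
--     for item in compartment_2:
--         if item in compartment_1_lookup:
--             compartment_1_lookup.clear()
--             return item
-- ===== SOURCE B (Python) =====
-- def item_in_both(compartment_1, compartment_2):
--     common = set(compartment_1) & set(compartment_2)
--     if common:
--         return min(common, key=compartment_2.index)
-- ===== Notes on version B (the rewrite author's own statement) =====
-- stated objective: alternative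
-- what changed: Replaces A's build-a-lookup-dict-then-scan-with-early-return by a set intersection of the two compartments followed by min over the common items keyed by their first index in compartment_2; correct because that index key is injective on distinct items, so the unique argmin is exactly the first common item A's scan returns.
import Mathlib
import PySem

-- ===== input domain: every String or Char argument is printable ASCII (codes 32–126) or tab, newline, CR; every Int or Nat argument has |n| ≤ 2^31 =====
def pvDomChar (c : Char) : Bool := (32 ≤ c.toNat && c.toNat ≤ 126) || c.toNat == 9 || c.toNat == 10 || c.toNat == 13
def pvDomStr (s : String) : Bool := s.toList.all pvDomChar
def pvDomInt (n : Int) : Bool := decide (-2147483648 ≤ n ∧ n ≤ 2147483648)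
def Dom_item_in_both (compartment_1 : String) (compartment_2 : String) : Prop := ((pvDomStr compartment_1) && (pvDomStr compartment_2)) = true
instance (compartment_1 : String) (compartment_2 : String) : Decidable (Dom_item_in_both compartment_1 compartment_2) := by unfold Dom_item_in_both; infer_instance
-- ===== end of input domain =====

-- B replaces A's build-a-dict-then-scan with set intersection plus argmin of first index in compartment_2 (alternative algorithm, same result since the index key is injective on distinct characters).


-- ===== PORT A =====
-- A's second loop: return the first item of compartment_2 that is a key of the lookup dict
def itemInBothScanA (lookup : PySem.Dict Char (Option Unit)) : List Char → Option String
  | [] => none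
  | c :: rest => if lookup.contains c then some (String.mk [c]) else itemInBothScanA lookup rest

def item_in_both (compartment_1 : String) (compartment_2 : String) : Option String :=
  let lookup := compartment_1.toList.foldl
    (fun d c => d.insert c (none : Option Unit)) PySem.Dict.empty
  itemInBothScanA lookup compartment_2.toList

-- ===== PORT B =====
-- B: common = set(c1) & set(c2); if common: return min(common, key=c2.index).
-- The key (first index in c2) is injective on the set's distinct elements, so the
-- Set's iteration order cannot affect the result of min.
def item_in_both_alt (compartment_1 : String) (compartment_2 : String) : Option String :=
  let common : PySem.Set Char :=
    PySem.Set.inter (PySem.Set.ofList compartment_1.toList) (PySem.Set.ofList compartment_2.toList)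
  match PySem.List.min? common (fun c => (PySem.List.index? compartment_2.toList c).getD 0) with
  | some c => some (String.mk [c])
  | none => none

-- ===== PRECONDITION & SPEC =====
def Spec_item_in_both (compartment_1 : String) (compartment_2 : String) (out : Option String) : Prop := out = item_in_both_alt compartment_1 compartment_2
instance (compartment_1 : String) (compartment_2 : String) (out : Option String) : Decidable (Spec_item_in_both compartment_1 compartment_2 out) := by unfold Spec_item_in_both; infer_instance

-- ===== CLAIM (what is proved, stated in full; the proofs are below) =====
def Claim_equal_item_in_both : Prop := ∀ (compartment_1 : String) (compartment_2 : String), Dom_item_in_both compartment_1 compartment_2 → Spec_item_in_both compartment_1 compartment_2 (item_in_both compartment_1 compartment_2)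

-- ===== LEMMAS AND PROOFS =====
theorem contains_lookup_iff_mem (cs1 : List Char) (c : Char) :
    (cs1.foldl (fun d x => d.insert x (none : Option Unit)) PySem.Dict.empty).contains c
      = true ↔ c ∈ cs1 := by
  rw [PySem.Dict.contains_iff_mem_keys, PySem.Dict.keys_foldl_insert]
  simp [PySem.Dict.keys_empty, PySem.Set.update_nil_left, PySem.Set.mem_ofList]

-- A's scan is find? of membership in compartment_1
theorem scanA_eq_find (cs1 cs2 : List Char) :
    itemInBothScanA (cs1.foldl (fun d x => d.insert x (none : Option Unit)) PySem.Dict.empty) cs2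
      = (cs2.find? (fun c => decide (c ∈ cs1))).map (fun c => String.mk [c]) := by
  induction cs2 with
  | nil => rfl
  | cons c rest ih =>
    simp only [itemInBothScanA, List.find?]
    by_cases h : c ∈ cs1
    · rw [if_pos ((contains_lookup_iff_mem cs1 c).mpr h)]
      simp [h]
    · rw [if_neg (by simpa using (contains_lookup_iff_mem cs1 c).not.mpr h)]
      simp [h, ih]

theorem mem_common_iff (cs1 cs2 : List Char) (x : Char) :
    x ∈ PySem.Set.inter (PySem.Set.ofList cs1) (PySem.Set.ofList cs2) ↔ x ∈ cs1 ∧ x ∈ cs2 := by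
  simp [PySem.Set.mem_inter, PySem.Set.mem_ofList]

-- any common element's first index in cs2 = pre ++ c :: suf (pre disjoint from cs1, c ∈ cs1)
-- is ≥ pre.length, with equality only for c
theorem key_min (cs1 pre suf : List Char) (c y : Char)
    (hc : c ∈ cs1) (hpre : ∀ x ∈ pre, x ∉ cs1) (hy1 : y ∈ cs1)
    (hy2 : y ∈ pre ++ c :: suf) :
    pre.length ≤ (PySem.List.index? (pre ++ c :: suf) y).getD 0 ∧
    ((PySem.List.index? (pre ++ c :: suf) y).getD 0 = pre.length → y = c) := by
  obtain ⟨k, hk⟩ : ∃ k, PySem.List.index? (pre ++ c :: suf) y = some k := by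
    have := (PySem.List.index?_isSome_iff (pre ++ c :: suf) y).mpr hy2
    exact Option.isSome_iff_exists.mp this
  obtain ⟨hklt, hget, hfirst⟩ := PySem.List.getElem_of_index?_eq_some hk
  rw [hk]
  simp only [Option.getD_some]
  have hge : pre.length ≤ k := by
    by_contra hlt
    push_neg at hlt
    have : (pre ++ c :: suf)[k] = pre[k]'hlt := List.getElem_append_left hlt
    have : y ∈ pre := by rw [← hget, this]; exact List.getElem_mem _
    exact hpre y this hy1
  refine ⟨hge, fun hEq => ?_⟩
  subst hEq
  have : (pre ++ c :: suf)[pre.length]'hklt = c := by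
    rw [List.getElem_append_right (le_refl pre.length)]
    simp
  rw [← hget, this]

theorem B_of_find_none (cs1 cs2 : List Char)
    (h : cs2.find? (fun c => decide (c ∈ cs1)) = none) :
    PySem.List.min? (PySem.Set.inter (PySem.Set.ofList cs1) (PySem.Set.ofList cs2))
      (fun c => (PySem.List.index? cs2 c).getD 0) = none := by
  rw [PySem.List.min?_eq_none_iff]
  rw [List.eq_nil_iff_forall_not_mem]
  intro x hx
  obtain ⟨h1, h2⟩ := (mem_common_iff cs1 cs2 x).mp hx
  have := List.find?_eq_none.mp h x h2
  simp at this
  exact this h1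

theorem B_of_find_some (cs1 cs2 : List Char) (c : Char)
    (h : cs2.find? (fun c => decide (c ∈ cs1)) = some c) :
    PySem.List.min? (PySem.Set.inter (PySem.Set.ofList cs1) (PySem.Set.ofList cs2))
      (fun c => (PySem.List.index? cs2 c).getD 0) = some c := by
  rw [List.find?_eq_some_iff_append] at h
  obtain ⟨hc, pre, suf, hsplit, hpre⟩ := h
  simp only [decide_eq_true_eq] at hc
  have hpre' : ∀ x ∈ pre, x ∉ cs1 := by
    intro x hx
    have := hpre x hx
    simpa using this
  subst hsplit
  set common := PySem.Set.inter (PySem.Set.ofList cs1) (PySem.Set.ofList (pre ++ c :: suf)) with hcom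
  set key := fun y => (PySem.List.index? (pre ++ c :: suf) y).getD 0 with hkey
  have hcmem : c ∈ common := (mem_common_iff _ _ c).mpr ⟨hc, by simp⟩
  obtain ⟨m, hm⟩ : ∃ m, PySem.List.min? common key = some m := by
    have : common ≠ [] := by
      intro hnil
      rw [hnil] at hcmem; exact absurd hcmem (List.not_mem_nil)
    rcases hmm : PySem.List.min? common key with _ | m
    · exact absurd (PySem.List.min?_eq_none_iff common key |>.mp hmm) this
    · exact ⟨m, rfl⟩
  have hmmem : m ∈ common := PySem.List.min?_mem hm
  obtain ⟨hm1, hm2⟩ := (mem_common_iff _ _ m).mp hmmem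
  have h1 : key m ≤ key c := PySem.List.min?_isMin hm c hcmem
  have h2 : pre.length ≤ key m ∧ (key m = pre.length → m = c) :=
    key_min cs1 pre suf c m hc hpre' hm1 hm2
  have hkc : key c = pre.length := by
    have : c ∉ pre := fun hmem => hpre' c hmem hc
    have hidx : PySem.List.index? (pre ++ c :: suf) c = some pre.length :=
      (PySem.List.index?_eq_some_iff _ _ _).mpr ⟨pre, suf, rfl, rfl, this⟩
    rw [hkey]
    simp only [hidx, Option.getD_some]
  rw [hm]
  congr 1
  exact h2.2 (le_antisymm (hkc ▸ h1) h2.1)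

-- ===== VERDICT (by name: the statement is the Claim_ definition above) =====
theorem item_in_both_spec : Claim_equal_item_in_both := by
  intro c1 c2 _
  unfold Spec_item_in_both item_in_both item_in_both_alt
  rw [scanA_eq_find]
  rcases h : c2.toList.find? (fun c => decide (c ∈ c1.toList)) with _ | c
  · show Option.map (fun c => String.mk [c]) none =
      (match PySem.List.min? (PySem.Set.inter (PySem.Set.ofList c1.toList) (PySem.Set.ofList c2.toList))
        (fun c => (PySem.List.index? c2.toList c).getD 0) with
      | some c => some (String.mk [c])
      | none => none)
    rw [B_of_find_none c1.toList c2.toList h]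
    rfl
  · show Option.map (fun c => String.mk [c]) (some c) =
      (match PySem.List.min? (PySem.Set.inter (PySem.Set.ofList c1.toList) (PySem.Set.ofList c2.toList))
        (fun c => (PySem.List.index? c2.toList c).getD 0) with
      | some c => some (String.mk [c])
      | none => none)
    rw [B_of_find_some c1.toList c2.toList c h]
    rfl
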